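-- pv_equiv track=rewrite | github.com/SRI-CSL/trio-quicly | tests/test_packet_number_tracker.py | ref_intervals_from_set
-- ===== SOURCE A (Python) =====
-- def ref_intervals_from_set(pns: set[int]):
--     if not pns:
--         return []
--     nums = sorted(pns)
--     # Build contiguous ranges [lo..hi]
--     ranges = []
--     start = prev = nums[0]
--     for x in nums[1:]:
--         if x == prev + 1:
--             prev = x
--             continue
--         # close current
--         ranges.append((start, prev))
--         start = prev = x
--     ranges.append((start, prev))
--     # Sort by high descending (like tracker)
--     ranges.sort(key=lambda r: r[1], reverse=True)
--     return ranges
-- ===== SOURCE B (Python) =====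
-- def ref_intervals_from_set(pns: set[int]):
--     ranges = []
--     for x in pns:
--         if x - 1 in pns:
--             continue  # x is not the start of a run
--         y = x
--         while y + 1 in pns:
--             y += 1
--         ranges.append((x, y))
--     ranges.sort(key=lambda r: r[1], reverse=True)
--     return ranges
-- ===== Notes on version B (the rewrite author's own statement) =====
-- stated objective: alternative
-- what changed: Instead of sorting all packet numbers and scanning with a running prev, B probes the set directly: each x with x-1 absent starts a run, which is extended by membership tests, and only the collected ranges are sorted by high descending.
import Mathlib
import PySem

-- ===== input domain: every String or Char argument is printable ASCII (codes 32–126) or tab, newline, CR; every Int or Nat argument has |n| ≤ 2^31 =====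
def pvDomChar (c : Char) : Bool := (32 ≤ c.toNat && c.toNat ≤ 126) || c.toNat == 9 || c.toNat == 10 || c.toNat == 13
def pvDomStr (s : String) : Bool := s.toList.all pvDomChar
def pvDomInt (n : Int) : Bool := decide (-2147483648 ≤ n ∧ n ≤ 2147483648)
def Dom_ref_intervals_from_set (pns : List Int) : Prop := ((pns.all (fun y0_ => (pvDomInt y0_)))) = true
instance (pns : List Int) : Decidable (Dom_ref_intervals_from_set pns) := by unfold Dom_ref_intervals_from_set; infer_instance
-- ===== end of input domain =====

-- B builds each contiguous run by direct membership probes (x with x-1 absent starts a run) and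
-- sorts only the collected ranges, instead of A's sort-everything-then-scan; return values agree on
-- every duplicate-free list (the List encoding of the Python set argument).

-- ===== PORT A =====
-- one step of A's scan over nums[1:]: state = (ranges, start, prev)
def refStep (s : List (Int × Int) × Int × Int) (x : Int) : List (Int × Int) × Int × Int :=
  if x = s.2.2 + 1 then (s.1, s.2.1, x) else (s.1 ++ [(s.2.1, s.2.2)], x, x)

def ref_intervals_from_set (pns : List Int) : List (Int × Int) :=
  if pns = [] then []
  else
    match PySem.List.sorted pns id with
    | [] => []  -- unreachable: the sorted permutation of a nonempty list is nonempty
    | n0 :: rest =>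
      let st := rest.foldl refStep ([], n0, n0)
      PySem.List.sorted (st.1 ++ [(st.2.1, st.2.2)]) (fun r => r.2) true

-- ===== PORT B =====
-- the 'while (y + 1) in pns: y += 1' loop; fuel pns.length is enough
-- (lemmas extendRun_eq / exists_run_end below)
def extendRun (pns : List Int) : Int → Nat → Int
  | y, 0 => y
  | y, k + 1 => if (y + 1) ∈ pns then extendRun pns (y + 1) k else y

def ref_intervals_from_set_alt (pns : List Int) : List (Int × Int) :=
  let ranges := pns.foldl
    (fun acc x => if (x - 1) ∈ pns then acc
     else acc ++ [(x, extendRun pns x pns.length)]) []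
  PySem.List.sorted ranges (fun r => r.2) true

-- ===== PRECONDITION & SPEC =====
-- The Python argument is a set[int]; its List Int encoding holds the DISTINCT elements, so
-- duplicate-free lists are the whole natural domain (a list with duplicates encodes no set).
def Pre_ref_intervals_from_set (pns : List Int) : Prop := pns.Nodup
instance (pns : List Int) : Decidable (Pre_ref_intervals_from_set pns) := by
  unfold Pre_ref_intervals_from_set; infer_instance

def pvWitness_ref_intervals_from_set : List Int := [3, 1, 2, 7]

def Spec_ref_intervals_from_set (pns : List Int) (out : List (Int × Int)) : Prop := out = ref_intervals_from_set_alt pns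
instance (pns : List Int) (out : List (Int × Int)) : Decidable (Spec_ref_intervals_from_set pns out) := by unfold Spec_ref_intervals_from_set; infer_instance

-- ===== CLAIM (what is proved, stated in full; the proofs are below) =====
def Claim_equal_ref_intervals_from_set : Prop := ∀ (pns : List Int), Dom_ref_intervals_from_set pns → Pre_ref_intervals_from_set pns → Spec_ref_intervals_from_set pns (ref_intervals_from_set pns)

-- ===== LEMMAS AND PROOFS =====

-- (a, b) is a maximal contiguous run of pns
def IsRange (pns : List Int) (a b : Int) : Prop :=
  a ≤ b ∧ (a - 1) ∉ pns ∧ (b + 1) ∉ pns ∧ ∀ z : Int, a ≤ z → z ≤ b → z ∈ pns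

lemma isRange_snd_unique {pns : List Int} {a b b' : Int}
    (h : IsRange pns a b) (h' : IsRange pns a b') : b = b' := by
  obtain ⟨h1, _, h3, h4⟩ := h
  obtain ⟨g1, _, g3, g4⟩ := h'
  rcases lt_trichotomy b b' with hlt | he | hgt
  · exact absurd (g4 (b + 1) (by omega) (by omega)) h3
  · exact he
  · exact absurd (h4 (b' + 1) (by omega) (by omega)) g3

lemma isRange_fst_unique {pns : List Int} {a a' b : Int}
    (h : IsRange pns a b) (h' : IsRange pns a' b) : a = a' := by
  obtain ⟨h1, h2, _, h4⟩ := h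
  obtain ⟨g1, g2, _, g4⟩ := h'
  rcases lt_trichotomy a a' with hlt | he | hgt
  · exact absurd (h4 (a' - 1) (by omega) (by omega)) g2
  · exact he
  · exact absurd (g4 (a - 1) (by omega) (by omega)) h2

-- A's scan, written structurally
def runsAux (start prev : Int) : List Int → List (Int × Int)
  | [] => [(start, prev)]
  | x :: xs => if x = prev + 1 then runsAux start x xs else (start, prev) :: runsAux x x xs

lemma foldl_refStep : ∀ (xs : List Int) (acc : List (Int × Int)) (start prev : Int),
    (xs.foldl refStep (acc, start, prev)).1 ++
      [((xs.foldl refStep (acc, start, prev)).2.1, (xs.foldl refStep (acc, start, prev)).2.2)]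
    = acc ++ runsAux start prev xs := by
  intro xs
  induction xs with
  | nil => intro acc start prev; simp [runsAux]
  | cons x xs ih =>
    intro acc start prev
    by_cases h : x = prev + 1
    · simpa [List.foldl_cons, refStep, h, runsAux] using ih acc start x
    · simp only [List.foldl_cons, refStep, h, if_false, runsAux]
      rw [ih (acc ++ [(start, prev)]) x x]
      simp

lemma runsAux_mem (pns : List Int) :
    ∀ (xs : List Int) (start prev : Int),
      List.Pairwise (· < ·) xs →
      (∀ y ∈ xs, prev < y) →
      (∀ z : Int, start ≤ z → z ≤ prev → z ∈ pns) →
      start ≤ prev →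
      (start - 1) ∉ pns →
      (∀ z : Int, prev < z → (z ∈ pns ↔ z ∈ xs)) →
      ∀ a b : Int, ((a, b) ∈ runsAux start prev xs ↔ (IsRange pns a b ∧ start ≤ a)) := by
  intro xs
  induction xs with
  | nil =>
    intro start prev _ _ hInt hle hstart hAfter a b
    simp only [runsAux, List.mem_singleton, Prod.mk.injEq]
    constructor
    · rintro ⟨rfl, rfl⟩
      refine ⟨⟨hle, hstart, ?_, fun z h1 h2 => hInt z h1 h2⟩, le_refl _⟩
      intro hmem
      exact absurd ((hAfter (b + 1) (by omega)).mp hmem) (List.not_mem_nil)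
    · rintro ⟨⟨hab, ha1, hb1, hsub⟩, hsa⟩
      have hamem : a ∈ pns := hsub a le_rfl hab
      have haprev : a ≤ prev := by
        by_contra hc
        exact absurd ((hAfter a (by omega)).mp hamem) (List.not_mem_nil)
      have ha : a = start := by
        by_contra hc
        have : a - 1 ∈ pns := hInt (a - 1) (by omega) (by omega)
        exact ha1 this
      subst ha
      have hbprev : b ≤ prev := by
        by_contra hc
        have : b ∈ pns := hsub b (by omega) le_rfl
        exact absurd ((hAfter b (by omega)).mp this) (List.not_mem_nil)
      have hb : b = prev := by
        by_contra hc
        exact hb1 (hInt (b + 1) (by omega) (by omega))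
      exact ⟨rfl, hb⟩
  | cons x xs ih =>
    intro start prev hPW hGT hInt hle hstart hAfter a b
    have hPWxs : List.Pairwise (· < ·) xs := hPW.tail
    have hxlt : ∀ y ∈ xs, x < y := fun y hy => (List.pairwise_cons.mp hPW).1 y hy
    have hprevx : prev < x := hGT x (List.mem_cons_self)
    have hxmem : x ∈ pns := (hAfter x hprevx).mpr List.mem_cons_self
    by_cases h : x = prev + 1
    · subst h
      simp only [runsAux]
      refine ih start (prev + 1) hPWxs (fun y hy => by have := hxlt y hy; omega)
        (fun z h1 h2 => ?_) (by omega) hstart (fun z hz => ?_) a b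
      · rcases eq_or_lt_of_le h2 with he | hlt
        · simpa [he] using hxmem
        · exact hInt z h1 (by omega)
      · constructor
        · intro hzm
          have := (hAfter z (by omega)).mp hzm
          rcases List.mem_cons.mp this with he | hm
          · omega
          · exact hm
        · intro hzm
          exact (hAfter z (by omega)).mpr (List.mem_cons_of_mem _ hzm)
    · have hxgt : prev + 1 < x := by omega
      have hp1 : (prev + 1) ∉ pns := by
        intro hm
        have := (hAfter (prev + 1) (by omega)).mp hm
        rcases List.mem_cons.mp this with he | hmm
        · omega
        · have := hxlt _ hmm; omega
      have hx1 : (x - 1) ∉ pns := by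
        intro hm
        have := (hAfter (x - 1) (by omega)).mp hm
        rcases List.mem_cons.mp this with he | hmm
        · omega
        · have := hxlt _ hmm; omega
      simp only [runsAux, if_neg h, List.mem_cons, Prod.mk.injEq]
      have hIH := ih x x hPWxs hxlt
        (fun z h1 h2 => by have : z = x := by omega
                           simpa [this] using hxmem)
        le_rfl hx1
        (fun z hz => by
          constructor
          · intro hzm
            rcases List.mem_cons.mp ((hAfter z (by omega)).mp hzm) with he | hm
            · omega
            · exact hm
          · intro hzm
            exact (hAfter z (by omega)).mpr (List.mem_cons_of_mem _ hzm)) a b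
      rw [hIH]
      constructor
      · rintro (⟨rfl, rfl⟩ | ⟨hr, hxa⟩)
        · exact ⟨⟨hle, hstart, hp1, fun z h1 h2 => hInt z h1 h2⟩, le_rfl⟩
        · exact ⟨hr, by omega⟩
      · rintro ⟨⟨hab, ha1, hb1, hsub⟩, hsa⟩
        rcases eq_or_lt_of_le hsa with he | hlt
        · left
          subst he
          have hbprev : b ≤ prev := by
            by_contra hc
            exact hp1 (hsub (prev + 1) (by omega) (by omega))
          have : b = prev := by
            by_contra hc
            exact hb1 (hInt (b + 1) (by omega) (by omega))
          exact ⟨rfl, this⟩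
        · right
          refine ⟨⟨hab, ha1, hb1, hsub⟩, ?_⟩
          have hamem : a ∈ pns := hsub a le_rfl hab
          have haprev : prev < a := by
            by_contra hc
            exact ha1 (hInt (a - 1) (by omega) (by omega))
          rcases List.mem_cons.mp ((hAfter a haprev).mp hamem) with he | hm
          · omega
          · have := hxlt _ hm; omega

-- firsts of runsAux are at least start
lemma runsAux_fst_ge : ∀ (xs : List Int) (start prev : Int),
    List.Pairwise (· < ·) xs → (∀ y ∈ xs, prev < y) → start ≤ prev →
    ∀ r ∈ runsAux start prev xs, start ≤ r.1 := by
  intro xs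
  induction xs with
  | nil => intro start prev _ _ h r hr; simp [runsAux] at hr; simp [hr]
  | cons x xs ih =>
    intro start prev hPW hGT h r hr
    have hprevx : prev < x := hGT x List.mem_cons_self
    have hxlt : ∀ y ∈ xs, x < y := fun y hy => (List.pairwise_cons.mp hPW).1 y hy
    by_cases hx : x = prev + 1
    · exact ih start x hPW.tail hxlt (by omega) r (by simpa [runsAux, hx] using hr)
    · rcases List.mem_cons.mp (by simpa [runsAux, hx] using hr) with he | hm
      · simp [he]
      · have := ih x x hPW.tail hxlt le_rfl r hm
        omega

-- firsts of runsAux are strictly increasing: gives Nodup of A's pre-sort list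
lemma runsAux_fst_pairwise : ∀ (xs : List Int) (start prev : Int),
    List.Pairwise (· < ·) xs → (∀ y ∈ xs, prev < y) → start ≤ prev →
    List.Pairwise (fun r r' : Int × Int => r.1 < r'.1) (runsAux start prev xs) := by
  intro xs
  induction xs with
  | nil => intro start prev _ _ _; simp [runsAux]
  | cons x xs ih =>
    intro start prev hPW hGT h
    have hprevx : prev < x := hGT x List.mem_cons_self
    have hxlt : ∀ y ∈ xs, x < y := fun y hy => (List.pairwise_cons.mp hPW).1 y hy
    by_cases hx : x = prev + 1
    · simpa [runsAux, hx] using ih start x hPW.tail hxlt (by omega)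
    · simp only [runsAux, if_neg hx]
      refine List.pairwise_cons.mpr ⟨?_, ih x x hPW.tail hxlt le_rfl⟩
      intro r hr
      have := runsAux_fst_ge xs x x hPW.tail hxlt le_rfl r hr
      simp only
      omega

-- ----- B side -----

-- counting: if x, x+1, …, x+m all lie in a duplicate-free list, it has more than m elements
lemma run_count (pns : List Int) (x : Int) (hx : x ∈ pns)
    (m : Nat) (hall : ∀ j : Nat, j < m → x + j + 1 ∈ pns) : m < pns.length := by
  have hsub : (x :: (List.range m).map (fun j : Nat => x + j + 1)) ⊆ pns := by
    intro z hz
    rcases List.mem_cons.mp hz with rfl | hm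
    · exact hx
    · obtain ⟨j, hj, rfl⟩ := List.mem_map.mp hm
      exact hall j (List.mem_range.mp hj)
  have hnodup : (x :: (List.range m).map (fun j : Nat => x + j + 1)).Nodup := by
    refine List.nodup_cons.mpr ⟨?_, ?_⟩
    · intro hm
      obtain ⟨j, _, hj⟩ := List.mem_map.mp hm
      omega
    · refine List.Nodup.map ?_ List.nodup_range
      intro a b hab
      simp only at hab
      omega
  have := (List.subperm_of_subset hnodup hsub).length_le
  simpa using this

-- Python's 'while (y + 1) in pns: y += 1' reaches exactly the run end, given enough fuel
lemma extendRun_eq (pns : List Int) :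
    ∀ (fuel : Nat) (y e : Int), y ≤ e → (∀ z : Int, y ≤ z → z ≤ e → z ∈ pns) →
      (e + 1) ∉ pns → (e - y).toNat < fuel → extendRun pns y fuel = e := by
  intro fuel
  induction fuel with
  | zero => intro y e _ _ _ h4; omega
  | succ k ih =>
    intro y e h1 h2 h3 h4
    rcases eq_or_lt_of_le h1 with rfl | hlt
    · simp [extendRun, h3]
    · have hy1 : y + 1 ∈ pns := h2 (y + 1) (by omega) (by omega)
      simp only [extendRun, if_pos hy1]
      exact ih (y + 1) e (by omega) (fun z hz1 hz2 => h2 z (by omega) hz2) h3 (by omega)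

lemma exists_run_end (pns : List Int) (x : Int) (hx : x ∈ pns) :
    ∃ e : Int, x ≤ e ∧ (∀ z : Int, x ≤ z → z ≤ e → z ∈ pns) ∧ (e + 1) ∉ pns ∧
      (e - x).toNat < pns.length := by
  have hex : ∃ k : Nat, x + (k : Int) + 1 ∉ pns := by
    by_contra hc
    have hc' : ∀ k : Nat, x + (k : Int) + 1 ∈ pns :=
      fun k => not_not.mp (fun hn => hc ⟨k, hn⟩)
    have := run_count pns x hx pns.length (fun j _ => hc' j)
    omega
  have hKspec := Nat.find_spec hex
  have hKmin : ∀ j : Nat, j < Nat.find hex → x + (j : Int) + 1 ∈ pns :=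
    fun j hj => not_not.mp (Nat.find_min hex hj)
  have hKlt : Nat.find hex < pns.length := run_count pns x hx _ hKmin
  refine ⟨x + (Nat.find hex : Int), by omega, ?_, hKspec, by omega⟩
  intro z h1 h2
  rcases eq_or_lt_of_le h1 with rfl | hlt
  · exact hx
  · obtain ⟨j, hj⟩ : ∃ j : Nat, (j : Int) = z - x := ⟨(z - x).toNat, by omega⟩
    have hjpos : 1 ≤ j := by omega
    have hjK : j - 1 < Nat.find hex := by omega
    have hm := hKmin (j - 1) hjK
    have hz : z = x + ((j - 1 : Nat) : Int) + 1 := by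
      have : ((j - 1 : Nat) : Int) = (j : Int) - 1 := by omega
      omega
    rwa [hz]

lemma extendRun_isRange (pns : List Int) (x : Int) (hx : x ∈ pns)
    (hx1 : (x - 1) ∉ pns) : IsRange pns x (extendRun pns x pns.length) := by
  obtain ⟨e, he1, he2, he3, he4⟩ := exists_run_end pns x hx
  rw [extendRun_eq pns pns.length x e he1 he2 he3 he4]
  exact ⟨he1, hx1, he3, he2⟩

-- B's pre-sort list, as a filter-map
def runsB (pns : List Int) : List (Int × Int) :=
  (pns.filter (fun x => decide ((x - 1) ∉ pns))).map
    (fun x => (x, extendRun pns x pns.length))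

lemma alt_eq_runsB (pns : List Int) :
    ref_intervals_from_set_alt pns = PySem.List.sorted (runsB pns) (fun r => r.2) true := by
  unfold ref_intervals_from_set_alt runsB
  have hstep : (fun (acc : List (Int × Int)) x => if (x - 1) ∈ pns then acc
        else acc ++ [(x, extendRun pns x pns.length)])
      = (fun acc x => if (fun x => decide ((x - 1) ∉ pns)) x = true
        then acc ++ [(fun x => (x, extendRun pns x pns.length)) x] else acc) := by
    funext acc x
    by_cases h : (x - 1) ∈ pns <;> simp [h]
  rw [hstep, PySem.List.foldl_append_if]
  simp

lemma memB (pns : List Int) (a b : Int) :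
    (a, b) ∈ runsB pns ↔ IsRange pns a b := by
  simp only [runsB, List.mem_map, List.mem_filter, decide_not, Bool.not_eq_eq_eq_not,
    Bool.not_true, decide_eq_false_iff_not, Prod.mk.injEq]
  constructor
  · rintro ⟨x, ⟨hxmem, hx1⟩, rfl, rfl⟩
    exact extendRun_isRange pns x hxmem hx1
  · intro hr
    refine ⟨a, ⟨hr.2.2.2 a le_rfl hr.1, hr.2.1⟩, rfl, ?_⟩
    exact (isRange_snd_unique (extendRun_isRange pns a (hr.2.2.2 a le_rfl hr.1) hr.2.1) hr)

lemma runsB_nodup (pns : List Int) (hnd : pns.Nodup) : (runsB pns).Nodup := by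
  refine List.Nodup.map ?_ (hnd.filter _)
  intro a b hab
  exact (Prod.ext_iff.mp hab).1

lemma runsB_keys (pns : List Int) (hnd : pns.Nodup) :
    List.Pairwise (fun r r' : Int × Int => r.2 ≠ r'.2) (runsB pns) := by
  refine List.Pairwise.imp_of_mem ?_ (runsB_nodup pns hnd)
  intro r r' hr hr' hne heq
  rcases r with ⟨a, b⟩; rcases r' with ⟨a', b'⟩
  simp only at heq
  subst heq
  have h1 := (memB pns a b).mp hr
  have h2 := (memB pns a' b).mp hr'
  exact hne (by rw [isRange_fst_unique h1 h2])

-- ===== VERDICT helper proof =====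
theorem ref_intervals_from_set_spec : Claim_equal_ref_intervals_from_set := by
  intro pns _ hpre
  unfold Spec_ref_intervals_from_set
  by_cases hnil : pns = []
  · subst hnil; decide
  · unfold ref_intervals_from_set
    rw [if_neg hnil]
    have hperm := PySem.List.sorted_perm pns id false
    cases hL : PySem.List.sorted pns id with
    | nil =>
      rw [hL] at hperm
      exact absurd (hperm.symm.eq_nil) hnil
    | cons n0 rest =>
      rw [hL] at hperm
      have hLnd : (n0 :: rest).Nodup := hperm.nodup_iff.mpr hpre
      have hLsorted : List.Pairwise (fun a b : Int => id a ≤ id b) (n0 :: rest) := by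
        have := PySem.List.sorted_pairwise pns id
        rwa [hL] at this
      have hLlt : List.Pairwise (· < ·) (n0 :: rest) :=
        (hLsorted.and hLnd).imp (fun h => lt_of_le_of_ne h.1 h.2)
      have hmemL : ∀ z : Int, z ∈ pns ↔ z ∈ n0 :: rest := fun z => hperm.mem_iff.symm
      have hPW : List.Pairwise (· < ·) rest := hLlt.tail
      have hGT : ∀ y ∈ rest, n0 < y := fun y hy => (List.pairwise_cons.mp hLlt).1 y hy
      have hn0 : n0 ∈ pns := (hmemL n0).mpr List.mem_cons_self
      have hInt : ∀ z : Int, n0 ≤ z → z ≤ n0 → z ∈ pns := by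
        intro z h1 h2
        have : z = n0 := by omega
        simpa [this] using hn0
      have hn0m : (n0 - 1) ∉ pns := by
        intro hm
        rcases List.mem_cons.mp ((hmemL (n0 - 1)).mp hm) with he | hmm
        · omega
        · have := hGT _ hmm; omega
      have hAfter : ∀ z : Int, n0 < z → (z ∈ pns ↔ z ∈ rest) := by
        intro z hz
        constructor
        · intro hm
          rcases List.mem_cons.mp ((hmemL z).mp hm) with he | hmm
          · omega
          · exact hmm
        · intro hm
          exact (hmemL z).mpr (List.mem_cons_of_mem _ hm)
      have hAmem : ∀ r : Int × Int, r ∈ runsAux n0 n0 rest ↔ IsRange pns r.1 r.2 := by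
        rintro ⟨a, b⟩
        rw [runsAux_mem pns rest n0 n0 hPW hGT hInt le_rfl hn0m hAfter a b]
        constructor
        · exact fun h => h.1
        · intro hr
          refine ⟨hr, ?_⟩
          have ha : a ∈ pns := hr.2.2.2 a le_rfl hr.1
          rcases List.mem_cons.mp ((hmemL a).mp ha) with he | hmm
          · omega
          · have := hGT _ hmm; omega
      have hAnodup : (runsAux n0 n0 rest).Nodup := by
        refine (runsAux_fst_pairwise rest n0 n0 hPW hGT le_rfl).imp ?_
        intro r r' h he
        rw [he] at h
        exact lt_irrefl _ h
      rw [alt_eq_runsB]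
      have h1 : (PySem.List.sorted (runsB pns) (fun r : Int × Int => r.2) true).Perm (runsB pns) :=
        PySem.List.sorted_perm (runsB pns) (fun r => r.2) true
      have hys_ne : List.Pairwise (fun r r' : Int × Int => r.2 ≠ r'.2)
          (PySem.List.sorted (runsB pns) (fun r : Int × Int => r.2) true) :=
        ((h1.pairwise_iff (fun h => Ne.symm h)).mpr (runsB_keys pns hpre))
      have hys_le : List.Pairwise (fun a b : Int × Int => b.2 ≤ a.2)
          (PySem.List.sorted (runsB pns) (fun r : Int × Int => r.2) true) :=
        PySem.List.sorted_pairwise_rev (runsB pns) (fun r => r.2)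
      have hys_lt : List.Pairwise (fun a b : Int × Int => b.2 < a.2)
          (PySem.List.sorted (runsB pns) (fun r : Int × Int => r.2) true) :=
        (hys_le.and hys_ne).imp (fun h => lt_of_le_of_ne h.1 h.2.symm)
      have hpermAB : (runsB pns).Perm (runsAux n0 n0 rest) := by
        refine (List.perm_ext_iff_of_nodup (runsB_nodup pns hpre) hAnodup).mpr ?_
        rintro ⟨a, b⟩
        rw [memB pns a b, hAmem ⟨a, b⟩]
      have hysA : (PySem.List.sorted (runsB pns) (fun r : Int × Int => r.2) true).Perm
          (runsAux n0 n0 rest) := h1.trans hpermAB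
      have := PySem.List.sorted_rev_eq_of_perm_of_pairwise_gt (runsAux n0 n0 rest)
        (PySem.List.sorted (runsB pns) (fun r : Int × Int => r.2) true)
        (fun r => r.2) hysA hys_lt
      simp only []
      rw [← this, foldl_refStep]
      simp
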